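-- pv_equiv track=rewrite | github.com/analytiq-hub/doc-router | packages/python/analytiq_data/flows/expressions.py | _rewrite_vars
-- ===== SOURCE A (Python) =====
-- def _rewrite_vars(expr: str) -> str:
--     """
--     Rewrite n8n-ish `$json` / `$node` to valid Python identifiers, but only when
--     those sequences appear *outside* Python string literals.
--
--     We intentionally do not try to be a full Python lexer; the goal is simply to
--     avoid rewriting inside quoted strings (e.g. "literal $json").
--     """
--
--     out: list[str] = []
--     i = 0
--     n = len(expr)
--
--     quote: str | None = None  # "'" | '"' when inside a string
--     triple = False
--     while i < n:
--         ch = expr[i]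
--
--         if quote is None:
--             if ch in ("'", '"'):
--                 # Enter string; detect triple quotes.
--                 if i + 2 < n and expr[i : i + 3] == ch * 3:
--                     quote = ch
--                     triple = True
--                     out.append(ch * 3)
--                     i += 3
--                     continue
--                 quote = ch
--                 triple = False
--                 out.append(ch)
--                 i += 1
--                 continue
--
--             if expr.startswith("$json", i):
--                 out.append("_json")
--                 i += 5
--                 continue
--             if expr.startswith("$node", i):
--                 out.append("_node")
--                 i += 5
--                 continue
--             if expr.startswith("$binary", i):
--                 out.append("_binary")
--                 i += 7
--                 continue
--
--             out.append(ch)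
--             i += 1
--             continue
--
--         # Inside a string.
--         if not triple and ch == "\\":
--             # Preserve escapes in normal strings.
--             if i + 1 < n:
--                 out.append(expr[i : i + 2])
--                 i += 2
--             else:
--                 out.append(ch)
--                 i += 1
--             continue
--
--         if triple:
--             if i + 2 < n and expr[i : i + 3] == quote * 3:
--                 out.append(quote * 3)
--                 i += 3
--                 quote = None
--                 triple = False
--                 continue
--             out.append(ch)
--             i += 1
--             continue
--
--         # Single-quoted string end.
--         if ch == quote:
--             out.append(ch)
--             i += 1
--             quote = None
--             continue
--
--         out.append(ch)
--         i += 1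
--
--     return "".join(out)
-- ===== SOURCE B (Python) =====
-- _REPLACEMENTS = (("$json", "_json"), ("$node", "_node"), ("$binary", "_binary"))
--
--
-- def _scan_string(expr, i):
--     """Index just past the string literal starting at expr[i] (a quote char).
--     Handles triple quotes and backslash escapes; an unterminated literal
--     runs to the end of the string."""
--     q = expr[i]
--     n = len(expr)
--     if expr[i:i + 3] == q * 3:
--         j = i + 3
--         while j < n:
--             if expr[j:j + 3] == q * 3:
--                 return j + 3
--             j += 1
--         return n
--     j = i + 1
--     while j < n:
--         c = expr[j]
--         if c == "\\":
--             j += 2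
--         elif c == q:
--             return j + 1
--         else:
--             j += 1
--     return n
--
--
-- def _rewrite_vars(expr: str) -> str:
--     """Rewrite $json/$node/$binary outside Python string literals by consuming
--     each whole string literal with a dedicated scanner and copying it verbatim."""
--     out = []
--     i = 0
--     n = len(expr)
--     while i < n:
--         ch = expr[i]
--         if ch == "'" or ch == '"':
--             j = _scan_string(expr, i)
--             out.append(expr[i:j])
--             i = j
--         else:
--             for src, dst in _REPLACEMENTS:
--                 if expr.startswith(src, i):
--                     out.append(dst)
--                     i += len(src)
--                     break
--             else:
--                 out.append(ch)
--                 i += 1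
--     return "".join(out)
-- ===== Notes on version B (the rewrite author's own statement) =====
-- stated objective: alternative
-- what changed: Replaced A's single while-loop state machine carrying quote/triple flags across iterations by a tokenizing scan that consumes each whole string literal at once with a dedicated scanner helper and copies it verbatim as a slice, and replaces the three hard-coded startswith branches by one loop over a replacement table.
import Mathlib
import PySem

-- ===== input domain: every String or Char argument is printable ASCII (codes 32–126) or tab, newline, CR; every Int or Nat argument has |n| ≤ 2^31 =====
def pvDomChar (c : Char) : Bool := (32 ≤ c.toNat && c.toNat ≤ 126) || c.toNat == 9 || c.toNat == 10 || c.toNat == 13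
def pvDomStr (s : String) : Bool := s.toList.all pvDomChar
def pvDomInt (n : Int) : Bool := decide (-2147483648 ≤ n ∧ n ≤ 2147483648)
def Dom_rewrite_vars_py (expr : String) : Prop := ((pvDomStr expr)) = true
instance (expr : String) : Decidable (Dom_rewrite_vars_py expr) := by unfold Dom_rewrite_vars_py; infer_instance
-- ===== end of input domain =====

-- B rewrites $json/$node/$binary outside string literals by consuming each whole
-- literal with a dedicated scanner instead of A's quote/triple state machine (alternative, same cost).
-- Loops are ported with a structural fuel counter (one unit per loop iteration; the
-- initial fuel s.length is enough, since the index strictly increases and stays ≤ s.length).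

-- ===== PORT A =====
-- A's while loop over index i with state (quote, triple, out); branches in A's order.
-- expr.startswith(p, i) is ported exactly as (s.drop i).take p.length = p;
-- `quote is None` is `quote = none`, and inside a string quote.getD ' ' is the quote char.
def pvLoopA (s : List Char) (fuel : Nat) (i : Nat) (quote : Option Char) (triple : Bool) (out : List Char) : List Char :=
  match fuel with
  | 0 => out
  | fuel + 1 =>
    if i < s.length then
      if quote = none then
        if s.getD i ' ' = '\'' ∨ s.getD i ' ' = '"' then
          if i + 2 < s.length ∧ (s.drop i).take 3 = [s.getD i ' ', s.getD i ' ', s.getD i ' '] then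
            pvLoopA s fuel (i + 3) (some (s.getD i ' ')) true (out ++ [s.getD i ' ', s.getD i ' ', s.getD i ' '])
          else
            pvLoopA s fuel (i + 1) (some (s.getD i ' ')) false (out ++ [s.getD i ' '])
        else if (s.drop i).take 5 = "$json".toList then
          pvLoopA s fuel (i + 5) none false (out ++ "_json".toList)
        else if (s.drop i).take 5 = "$node".toList then
          pvLoopA s fuel (i + 5) none false (out ++ "_node".toList)
        else if (s.drop i).take 7 = "$binary".toList then
          pvLoopA s fuel (i + 7) none false (out ++ "_binary".toList)
        else
          pvLoopA s fuel (i + 1) none false (out ++ [s.getD i ' '])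
      else
        if triple = false ∧ s.getD i ' ' = '\\' then
          if i + 1 < s.length then pvLoopA s fuel (i + 2) quote triple (out ++ (s.drop i).take 2)
          else pvLoopA s fuel (i + 1) quote triple (out ++ [s.getD i ' '])
        else if triple then
          if i + 2 < s.length ∧ (s.drop i).take 3 = [quote.getD ' ', quote.getD ' ', quote.getD ' '] then
            pvLoopA s fuel (i + 3) none false (out ++ [quote.getD ' ', quote.getD ' ', quote.getD ' '])
          else pvLoopA s fuel (i + 1) quote triple (out ++ [s.getD i ' '])
        else if s.getD i ' ' = quote.getD ' ' then
          pvLoopA s fuel (i + 1) none false (out ++ [s.getD i ' '])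
        else
          pvLoopA s fuel (i + 1) quote triple (out ++ [s.getD i ' '])
    else out

def rewrite_vars_py (expr : String) : String :=
  String.ofList (pvLoopA expr.toList expr.toList.length 0 none false [])

-- ===== PORT B =====
-- Source B's _scan_string, triple-quote branch: while loop looking for the closing triple.
def pvScanTriple (s : List Char) (fuel : Nat) (q : Char) (j : Nat) : Nat :=
  match fuel with
  | 0 => s.length
  | fuel + 1 =>
    if j < s.length then
      if (s.drop j).take 3 = [q, q, q] then j + 3
      else pvScanTriple s fuel q (j + 1)
    else s.length

-- Source B's _scan_string, single-quote branch: while loop skipping escapes.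
def pvScanSingle (s : List Char) (fuel : Nat) (q : Char) (j : Nat) : Nat :=
  match fuel with
  | 0 => s.length
  | fuel + 1 =>
    if j < s.length then
      if s.getD j ' ' = '\\' then pvScanSingle s fuel q (j + 2)
      else if s.getD j ' ' = q then j + 1
      else pvScanSingle s fuel q (j + 1)
    else s.length

def pvScanString (s : List Char) (i : Nat) : Nat :=
  if (s.drop i).take 3 = [s.getD i ' ', s.getD i ' ', s.getD i ' '] then
    pvScanTriple s s.length (s.getD i ' ') (i + 3)
  else pvScanSingle s s.length (s.getD i ' ') (i + 1)

-- Source B's replacement table and the for/break over it.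
def pvREPL : List (List Char × List Char) :=
  [("$json".toList, "_json".toList), ("$node".toList, "_node".toList), ("$binary".toList, "_binary".toList)]

def pvTryRepl (s : List Char) (i : Nat) : List (List Char × List Char) → Option (List Char × Nat)
  | [] => none
  | (src, dst) :: rest =>
    if (s.drop i).take src.length = src then some (dst, src.length)
    else pvTryRepl s i rest

-- Source B's main while loop
def pvLoopB (s : List Char) (fuel : Nat) (i : Nat) (out : List Char) : List Char :=
  match fuel with
  | 0 => out
  | fuel + 1 =>
    if i < s.length then
      if s.getD i ' ' = '\'' ∨ s.getD i ' ' = '"' then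
        pvLoopB s fuel (pvScanString s i) (out ++ (s.drop i).take (pvScanString s i - i))
      else
        match pvTryRepl s i pvREPL with
        | some (dst, k) => pvLoopB s fuel (i + k) (out ++ dst)
        | none => pvLoopB s fuel (i + 1) (out ++ [s.getD i ' '])
    else out

def rewrite_vars_py_alt (expr : String) : String :=
  String.ofList (pvLoopB expr.toList expr.toList.length 0 [])

-- ===== PRECONDITION & SPEC =====
def Spec_rewrite_vars_py (expr : String) (out : String) : Prop := out = rewrite_vars_py_alt expr
instance (expr : String) (out : String) : Decidable (Spec_rewrite_vars_py expr out) := by unfold Spec_rewrite_vars_py; infer_instance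

-- ===== CLAIM (what is proved, stated in full; the proofs are below) =====
def Claim_equal_rewrite_vars_py : Prop := ∀ (expr : String), Dom_rewrite_vars_py expr → Spec_rewrite_vars_py expr (rewrite_vars_py expr)

-- ===== LEMMAS AND PROOFS =====

theorem pvScanTriple_ge (s : List Char) (q : Char) (fuel : Nat) :
    ∀ j, min s.length j ≤ pvScanTriple s fuel q j := by
  induction fuel with
  | zero => intro j; simp [pvScanTriple]
  | succ f ih =>
    intro j
    simp only [pvScanTriple]
    split
    · split
      · omega
      · have := ih (j + 1); omega
    · omega

theorem pvScanSingle_ge (s : List Char) (q : Char) (fuel : Nat) :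
    ∀ j, min s.length j ≤ pvScanSingle s fuel q j := by
  induction fuel with
  | zero => intro j; simp [pvScanSingle]
  | succ f ih =>
    intro j
    simp only [pvScanSingle]
    split
    · split
      · have := ih (j + 2); omega
      · split
        · omega
        · have := ih (j + 1); omega
    · omega

theorem pvScanTriple_le (s : List Char) (q : Char) (fuel : Nat) :
    ∀ j, pvScanTriple s fuel q j ≤ s.length := by
  induction fuel with
  | zero => intro j; simp [pvScanTriple]
  | succ f ih =>
    intro j
    simp only [pvScanTriple]
    split
    · split
      · rename_i h3
        have := congrArg List.length h3
        simp at this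
        omega
      · exact ih (j + 1)
    · omega

theorem pvScanSingle_le (s : List Char) (q : Char) (fuel : Nat) :
    ∀ j, pvScanSingle s fuel q j ≤ s.length := by
  induction fuel with
  | zero => intro j; simp [pvScanSingle]
  | succ f ih =>
    intro j
    simp only [pvScanSingle]
    split
    · split
      · exact ih (j + 2)
      · split
        · omega
        · exact ih (j + 1)
    · omega

-- the scanners' value does not depend on the fuel, once the fuel is sufficient
theorem pvScanTriple_fuel (s : List Char) (q : Char) (f₁ : Nat) :
    ∀ f₂ j, s.length - j ≤ f₁ → s.length - j ≤ f₂ →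
      pvScanTriple s f₁ q j = pvScanTriple s f₂ q j := by
  induction f₁ with
  | zero =>
    intro f₂ j h1 _
    have hj : ¬ j < s.length := by omega
    cases f₂ <;> simp [pvScanTriple, hj]
  | succ f ih =>
    intro f₂ j h1 h2
    by_cases hj : j < s.length
    · obtain ⟨g, rfl⟩ : ∃ g, f₂ = g + 1 := ⟨f₂ - 1, by omega⟩
      simp only [pvScanTriple, hj, if_true]
      split
      · rfl
      · exact ih g (j + 1) (by omega) (by omega)
    · cases f₂ <;> simp [pvScanTriple, hj]

theorem pvScanSingle_fuel (s : List Char) (q : Char) (f₁ : Nat) :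
    ∀ f₂ j, s.length - j ≤ f₁ → s.length - j ≤ f₂ →
      pvScanSingle s f₁ q j = pvScanSingle s f₂ q j := by
  induction f₁ with
  | zero =>
    intro f₂ j h1 _
    have hj : ¬ j < s.length := by omega
    cases f₂ <;> simp [pvScanSingle, hj]
  | succ f ih =>
    intro f₂ j h1 h2
    by_cases hj : j < s.length
    · obtain ⟨g, rfl⟩ : ∃ g, f₂ = g + 1 := ⟨f₂ - 1, by omega⟩
      simp only [pvScanSingle, hj, if_true]
      split
      · exact ih g (j + 2) (by omega) (by omega)
      · split
        · rfl
        · exact ih g (j + 1) (by omega) (by omega)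
    · cases f₂ <;> simp [pvScanSingle, hj]

-- one-step unfolding of the scanners at the canonical fuel s.length
theorem pvScanTriple_step (s : List Char) (q : Char) (j : Nat) (hj : j < s.length) :
    pvScanTriple s s.length q j
      = if (s.drop j).take 3 = [q, q, q] then j + 3 else pvScanTriple s s.length q (j + 1) := by
  obtain ⟨g, hg⟩ : ∃ g, s.length = g + 1 := ⟨s.length - 1, by omega⟩
  conv_lhs => rw [hg]
  simp only [pvScanTriple, hj, if_true]
  split
  · rfl
  · exact pvScanTriple_fuel s q g s.length (j + 1) (by omega) (by omega)

theorem pvScanSingle_step (s : List Char) (q : Char) (j : Nat) (hj : j < s.length) :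
    pvScanSingle s s.length q j
      = if s.getD j ' ' = '\\' then pvScanSingle s s.length q (j + 2)
        else if s.getD j ' ' = q then j + 1
        else pvScanSingle s s.length q (j + 1) := by
  obtain ⟨g, hg⟩ : ∃ g, s.length = g + 1 := ⟨s.length - 1, by omega⟩
  conv_lhs => rw [hg]
  simp only [pvScanSingle, hj, if_true]
  split
  · exact pvScanSingle_fuel s q g s.length (j + 2) (by omega) (by omega)
  · split
    · rfl
    · exact pvScanSingle_fuel s q g s.length (j + 1) (by omega) (by omega)

theorem pvScanTriple_end (s : List Char) (q : Char) (fuel j : Nat) (hj : ¬ j < s.length) :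
    pvScanTriple s fuel q j = s.length := by
  cases fuel <;> simp [pvScanTriple, hj]

theorem pvScanSingle_end (s : List Char) (q : Char) (fuel j : Nat) (hj : ¬ j < s.length) :
    pvScanSingle s fuel q j = s.length := by
  cases fuel <;> simp [pvScanSingle, hj]

-- once i is past the end, A's loop returns out (any fuel)
theorem pvLoopA_end (s : List Char) (fuel i : Nat) (q : Option Char) (t : Bool) (out : List Char)
    (h : ¬ i < s.length) : pvLoopA s fuel i q t out = out := by
  cases fuel <;> simp [pvLoopA, h]

-- A's loop value does not depend on the fuel, once the fuel is sufficient
theorem pvLoopA_fuel (s : List Char) (f₁ : Nat) :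
    ∀ f₂ i quote triple out, s.length - i ≤ f₁ → s.length - i ≤ f₂ →
      pvLoopA s f₁ i quote triple out = pvLoopA s f₂ i quote triple out := by
  induction f₁ with
  | zero =>
    intro f₂ i quote triple out h1 _
    have hi : ¬ i < s.length := by omega
    rw [pvLoopA_end s 0 i _ _ _ hi, pvLoopA_end s f₂ i _ _ _ hi]
  | succ f ih =>
    intro f₂ i quote triple out h1 h2
    by_cases hi : i < s.length
    · obtain ⟨g, rfl⟩ : ∃ g, f₂ = g + 1 := ⟨f₂ - 1, by omega⟩
      simp only [pvLoopA, hi, if_true]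
      split_ifs <;> exact ih g _ _ _ _ (by omega) (by omega)
    · rw [pvLoopA_end s (f + 1) i _ _ _ hi, pvLoopA_end s f₂ i _ _ _ hi]

-- drop/take decomposition used to merge A's char-by-char appends into B's slice
theorem pv_take_cons (s : List Char) (j e : Nat) (hj : j < s.length) (he : j < e) :
    (s.drop j).take (e - j) = s.getD j ' ' :: (s.drop (j + 1)).take (e - (j + 1)) := by
  rw [List.drop_eq_getElem_cons hj, List.getD_eq_getElem s ' ' hj]
  have : e - j = (e - (j + 1)) + 1 := by omega
  rw [this, List.take_succ_cons]

-- A inside a triple string starting at j equals A restarted (outside any string) at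
-- pvScanTriple's end, with the body appended as one slice
theorem pvLoopA_triple (s : List Char) (q : Char) (fuel : Nat) :
    ∀ j out, s.length - j ≤ fuel →
      pvLoopA s fuel j (some q) true out
        = pvLoopA s s.length (pvScanTriple s s.length q j) none false
            (out ++ (s.drop j).take (pvScanTriple s s.length q j - j)) := by
  induction fuel with
  | zero =>
    intro j out h1
    have hj : ¬ j < s.length := by omega
    rw [pvScanTriple_end s q s.length j hj]
    have : s.length - j = 0 := by omega
    rw [this]
    simp [pvLoopA_end, hj]
  | succ f ih =>
    intro j out h1
    by_cases hj : j < s.length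
    · rw [pvScanTriple_step s q j hj]
      simp only [pvLoopA, hj, if_true, reduceCtorEq, if_false, Bool.true_eq_false, false_and,
        Option.getD_some]
      by_cases h3 : (s.drop j).take 3 = [q, q, q]
      · have hlen : j + 3 ≤ s.length := by
          have := congrArg List.length h3; simp at this; omega
        simp only [h3, if_true, (by omega : j + 2 < s.length), true_and]
        have : (s.drop j).take (j + 3 - j) = [q, q, q] := by
          rw [(by omega : j + 3 - j = 3), h3]
        rw [this]
        exact (pvLoopA_fuel s f s.length (j + 3) none false _ (by omega) (by omega))
      · have hcond : ¬ (j + 2 < s.length ∧ (s.drop j).take 3 = [q, q, q]) := by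
          intro hc; exact h3 hc.2
        simp only [h3, hcond, if_false]
        rw [ih (j + 1) (out ++ [s.getD j ' ']) (by omega)]
        have hge := pvScanTriple_ge s q s.length (j + 1)
        rw [pv_take_cons s j (pvScanTriple s s.length q (j + 1)) hj (by omega)]
        simp
    · rw [pvScanTriple_end s q s.length j hj]
      have : s.length - j = 0 := by omega
      rw [this]
      simp [pvLoopA_end, hj]

-- A inside a single-quoted string likewise
theorem pvLoopA_single (s : List Char) (q : Char) (fuel : Nat) :
    ∀ j out, s.length - j ≤ fuel →
      pvLoopA s fuel j (some q) false out
        = pvLoopA s s.length (pvScanSingle s s.length q j) none false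
            (out ++ (s.drop j).take (pvScanSingle s s.length q j - j)) := by
  induction fuel with
  | zero =>
    intro j out h1
    have hj : ¬ j < s.length := by omega
    rw [pvScanSingle_end s q s.length j hj]
    have : s.length - j = 0 := by omega
    rw [this]
    simp [pvLoopA_end, hj]
  | succ f ih =>
    intro j out h1
    by_cases hj : j < s.length
    · rw [pvScanSingle_step s q j hj]
      simp only [pvLoopA, hj, if_true, reduceCtorEq, if_false, true_and, Option.getD_some,
        Bool.false_eq_true]
      by_cases hb : s.getD j ' ' = '\\'
      · simp only [hb, if_true]
        by_cases h1' : j + 1 < s.length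
        · simp only [h1', if_true]
          rw [ih (j + 2) (out ++ (s.drop j).take 2) (by omega)]
          have hge := pvScanSingle_ge s q s.length (j + 2)
          rw [pv_take_cons s j (pvScanSingle s s.length q (j + 2)) hj (by omega),
              pv_take_cons s (j + 1) (pvScanSingle s s.length q (j + 2)) h1' (by omega)]
          have h2 : (s.drop j).take 2 = [s.getD j ' ', s.getD (j + 1) ' '] := by
            rw [List.drop_eq_getElem_cons hj, List.getD_eq_getElem s ' ' hj]
            rw [List.drop_eq_getElem_cons h1', List.getD_eq_getElem s ' ' h1']
            rfl
          rw [h2]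
          simp
        · simp only [h1', if_false]
          have hend : pvScanSingle s s.length q (j + 2) = s.length :=
            pvScanSingle_end s q s.length (j + 2) (by omega)
          rw [hend]
          rw [pvLoopA_end s f (j + 1) (some q) false _ (by omega),
              pvLoopA_end s s.length s.length none false _ (by omega)]
          rw [pv_take_cons s j s.length hj (by omega)]
          have hnil : (s.drop (j + 1)).take (s.length - (j + 1)) = [] := by
            have : s.drop (j + 1) = [] := List.drop_eq_nil_of_le (by omega)
            simp [this]
          rw [hnil, hb]
      · simp only [hb, if_false]
        by_cases hq : s.getD j ' ' = q
        · simp only [hq, if_true]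
          have : (s.drop j).take (j + 1 - j) = [q] := by
            rw [pv_take_cons s j (j + 1) hj (by omega), hq]
            norm_num
          rw [this]
          exact pvLoopA_fuel s f s.length (j + 1) none false _ (by omega) (by omega)
        · simp only [hq, if_false]
          rw [ih (j + 1) (out ++ [s.getD j ' ']) (by omega)]
          have hge := pvScanSingle_ge s q s.length (j + 1)
          rw [pv_take_cons s j (pvScanSingle s s.length q (j + 1)) hj (by omega)]
          simp
    · rw [pvScanSingle_end s q s.length j hj]
      have : s.length - j = 0 := by omega
      rw [this]
      simp [pvLoopA_end, hj]

-- tryRepl over the literal table unfolds to A's three startswith tests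
theorem pvTryRepl_eq (s : List Char) (i : Nat) :
    pvTryRepl s i pvREPL =
      (if (s.drop i).take 5 = "$json".toList then some ("_json".toList, 5)
       else if (s.drop i).take 5 = "$node".toList then some ("_node".toList, 5)
       else if (s.drop i).take 7 = "$binary".toList then some ("_binary".toList, 7)
       else none) := by
  simp only [pvTryRepl, pvREPL]
  have l1 : "$json".toList.length = 5 := by decide
  have l2 : "$node".toList.length = 5 := by decide
  have l3 : "$binary".toList.length = 7 := by decide
  rw [l1, l2, l3]

-- main equivalence of the two loops, outside any string literal
theorem pvLoop_eq (s : List Char) (fuel : Nat) :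
    ∀ i out, s.length - i ≤ fuel →
      pvLoopA s fuel i none false out = pvLoopB s fuel i out := by
  induction fuel with
  | zero => intro i out _; rfl
  | succ f ih =>
    intro i out hfu
    by_cases h : i < s.length
    · simp only [pvLoopA, pvLoopB, h, if_true, reduceCtorEq, reduceIte]
      by_cases hq : s.getD i ' ' = '\'' ∨ s.getD i ' ' = '"'
      · simp only [hq, if_true]
        by_cases h3 : (s.drop i).take 3 = [s.getD i ' ', s.getD i ' ', s.getD i ' ']
        · have hlen : i + 3 ≤ s.length := by
            have := congrArg List.length h3; simp at this; omega
          simp only [h3, (by omega : i + 2 < s.length), true_and, if_true]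
          have hscan : pvScanString s i = pvScanTriple s s.length (s.getD i ' ') (i + 3) := by
            rw [pvScanString, if_pos h3]
          rw [pvLoopA_triple s (s.getD i ' ') f (i + 3) _ (by omega)]
          rw [hscan]
          have hge := pvScanTriple_ge s (s.getD i ' ') s.length (i + 3)
          have hle := pvScanTriple_le s (s.getD i ' ') s.length (i + 3)
          set e := pvScanTriple s s.length (s.getD i ' ') (i + 3) with he
          rw [pvLoopA_fuel s s.length f e none false _ (by omega) (by omega),
              ih e _ (by omega)]
          congr 1
          have e1 : s.getD (i + 1) ' ' = s.getD i ' ' := by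
            have hh := pv_take_cons s i (i + 3) h (by omega)
            rw [pv_take_cons s (i + 1) (i + 3) (by omega) (by omega)] at hh
            rw [(by omega : i + 3 - i = 3), h3] at hh
            injection hh with _ hh
            injection hh with e1' _
            exact e1'.symm
          have e2 : s.getD (i + 2) ' ' = s.getD i ' ' := by
            have hh := pv_take_cons s i (i + 3) h (by omega)
            rw [pv_take_cons s (i + 1) (i + 3) (by omega) (by omega),
                pv_take_cons s (i + 2) (i + 3) (by omega) (by omega)] at hh
            rw [(by omega : i + 3 - i = 3), h3] at hh
            injection hh with _ hh
            injection hh with _ hh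
            injection hh with e2' _
            exact e2'.symm
          have hsplit : (s.drop i).take (e - i)
              = [s.getD i ' ', s.getD i ' ', s.getD i ' '] ++ (s.drop (i + 3)).take (e - (i + 3)) := by
            rw [pv_take_cons s i e h (by omega),
                pv_take_cons s (i + 1) e (by omega) (by omega),
                pv_take_cons s (i + 2) e (by omega) (by omega), e1, e2]
            rfl
          rw [hsplit]
          simp
        · have hcond : ¬ (i + 2 < s.length ∧ (s.drop i).take 3 = [s.getD i ' ', s.getD i ' ', s.getD i ' ']) := by
            intro hc; exact h3 hc.2
          simp only [h3, hcond, if_false]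
          have hscan : pvScanString s i = pvScanSingle s s.length (s.getD i ' ') (i + 1) := by
            rw [pvScanString, if_neg h3]
          rw [pvLoopA_single s (s.getD i ' ') f (i + 1) _ (by omega)]
          rw [hscan]
          have hge := pvScanSingle_ge s (s.getD i ' ') s.length (i + 1)
          have hle := pvScanSingle_le s (s.getD i ' ') s.length (i + 1)
          set e := pvScanSingle s s.length (s.getD i ' ') (i + 1) with he
          rw [pvLoopA_fuel s s.length f e none false _ (by omega) (by omega),
              ih e _ (by omega)]
          congr 1
          rw [pv_take_cons s i e h (by omega)]
          simp
      · simp only [hq, if_false]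
        symm
        split
        · rename_i dst k hm
          rw [pvTryRepl_eq] at hm
          split_ifs at hm with c1 c2 c3
          · simp only [Option.some.injEq, Prod.mk.injEq] at hm
            obtain ⟨hd, hk⟩ := hm
            subst hd; subst hk
            simp only [c1, if_true]
            exact (ih (i + 5) (out ++ "_json".toList) (by omega)).symm
          · simp only [Option.some.injEq, Prod.mk.injEq] at hm
            obtain ⟨hd, hk⟩ := hm
            subst hd; subst hk
            simp only [c1, c2, if_false, if_true]
            exact (ih (i + 5) (out ++ "_node".toList) (by omega)).symm
          · simp only [Option.some.injEq, Prod.mk.injEq] at hm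
            obtain ⟨hd, hk⟩ := hm
            subst hd; subst hk
            simp only [c1, c2, c3, if_false, if_true]
            exact (ih (i + 7) (out ++ "_binary".toList) (by omega)).symm
        · rename_i hm
          rw [pvTryRepl_eq] at hm
          split_ifs at hm with c1 c2 c3
          simp only [c1, c2, c3, if_false]
          exact (ih (i + 1) (out ++ [s.getD i ' ']) (by omega)).symm
    · cases f <;> simp [pvLoopA, pvLoopB, h]

-- ===== VERDICT (by name: the statement is the Claim_ definition above) =====
theorem rewrite_vars_py_spec : Claim_equal_rewrite_vars_py := by
  intro expr _
  unfold Spec_rewrite_vars_py rewrite_vars_py rewrite_vars_py_alt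
  rw [pvLoop_eq expr.toList expr.toList.length 0 [] (by omega)]
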